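-- pv_equiv track=rewrite | github.com/SamujjwalSam/Short-text_GNN | Data_Handlers/token_handler_nx.py | find_cooccurrences
-- ===== SOURCE A (Python) =====
-- def find_cooccurrences(txt_window: list):
--     edges = {}
--     for i, token1 in enumerate(txt_window):
--         for token2 in txt_window[i + 1:]:
--             if token1 == token2: continue
--             try:
--                 edges[(token1, token2)] += 1
--             except KeyError as e:
--                 edges[(token1, token2)] = 1
--
--     return edges
-- ===== SOURCE B (Python) =====
-- def find_cooccurrences(txt_window: list):
--     # One right-to-left pass keeping, per distinct token of the processed suffix,
--     # in first-occurrence order, its multiplicity and its ready-made edge block.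
--     state = []  # [(token, count_in_suffix, block)], block = [(partner, weight)]
--     for t in reversed(txt_window):
--         prev = {u: c for (x, _, b) in state if x == t for (u, c) in b}
--         c_t = 1 + sum(c for (x, c, _) in state if x == t)
--         rest = [e for e in state if e[0] != t]
--         block = [(u, c + prev.get(u, 0)) for (u, c, _) in rest]
--         state = [(t, c_t, block)] + rest
--     return {(t, u): c for (t, _, b) in state for (u, c) in b}
-- ===== Notes on version B (the rewrite author's own statement) =====
-- stated objective: alternative
-- what changed: A scans all O(n^2) ordered index pairs incrementing a dict; B makes one right-to-left pass that keeps, per distinct token of the processed suffix, its multiplicity and a ready-made edge block, merging each new token in O(k) where k is the number of distinct tokens (same cost when all tokens are distinct).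
import Mathlib
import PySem

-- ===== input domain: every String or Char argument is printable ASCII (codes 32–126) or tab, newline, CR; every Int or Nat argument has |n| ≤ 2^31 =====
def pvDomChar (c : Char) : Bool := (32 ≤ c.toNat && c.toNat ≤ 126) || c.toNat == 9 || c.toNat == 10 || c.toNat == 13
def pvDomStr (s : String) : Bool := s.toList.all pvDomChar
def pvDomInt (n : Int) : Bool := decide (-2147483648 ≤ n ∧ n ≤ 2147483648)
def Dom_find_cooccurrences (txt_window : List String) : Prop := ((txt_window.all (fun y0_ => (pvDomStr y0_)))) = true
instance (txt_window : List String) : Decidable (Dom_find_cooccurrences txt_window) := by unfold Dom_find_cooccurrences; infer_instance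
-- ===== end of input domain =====

-- B replaces A's all-pairs scan by one right-to-left pass that keeps, per distinct suffix
-- token, its multiplicity and its ready-made edge block (a different traversal of the window).

-- ===== PORT A =====
def find_cooccurrences (txt_window : List String) : List (String × String × Int) :=
  let edges := (PySem.List.enumerate txt_window).foldl (fun d it =>
      (PySem.List.slice txt_window (some (it.1 + 1))).foldl (fun d token2 =>
        if it.2 == token2 then d
        else d.modify (it.2, token2) 0 (· + 1)) d) PySem.Dict.empty
  edges.items.map (fun p => (p.1.1, p.1.2, p.2))

-- ===== PORT B =====
def bStep (state : List (String × Int × List (String × Int))) (t : String) :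
    List (String × Int × List (String × Int)) :=
  let prev := PySem.Dict.ofList ((state.filter (fun e => e.1 == t)).flatMap (fun e => e.2.2))
  let c_t : Int := 1 + ((state.filter (fun e => e.1 == t)).map (fun e => e.2.1)).sum
  let rest := state.filter (fun e => !(e.1 == t))
  let block := rest.map (fun e => (e.1, e.2.1 + prev.getD e.1 0))
  (t, c_t, block) :: rest

def find_cooccurrences_alt (txt_window : List String) : List (String × String × Int) :=
  let state := txt_window.reverse.foldl bStep []
  let pairs := state.flatMap (fun e => e.2.2.map (fun uc => ((e.1, uc.1), uc.2)))
  (PySem.Dict.ofList pairs).items.map (fun p => (p.1.1, p.1.2, p.2))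

-- ===== PRECONDITION & SPEC =====
def Spec_find_cooccurrences (txt_window : List String) (out : List (String × String × Int)) : Prop := out = find_cooccurrences_alt txt_window
instance (txt_window : List String) (out : List (String × String × Int)) : Decidable (Spec_find_cooccurrences txt_window out) := by unfold Spec_find_cooccurrences; infer_instance

-- ===== CLAIM (what is proved, stated in full; the proofs are below) =====
def Claim_equal_find_cooccurrences : Prop := ∀ (txt_window : List String), Dom_find_cooccurrences txt_window → Spec_find_cooccurrences txt_window (find_cooccurrences txt_window)

-- ===== LEMMAS AND PROOFS =====

-- the stream of ordered pairs A counts, in A's traversal order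
def psPure : List String → List (String × String)
  | [] => []
  | t :: r => (r.filter (fun u => !(t == u))).map (fun u => (t, u)) ++ psPure r

-- the common canonical result: distinct pairs in first-appearance order, with their multiplicities
def canon (w : List String) : List ((String × String) × Int) :=
  (PySem.Set.ofList (psPure w)).map (fun k => (k, ((psPure w).count k : Int)))

-- B's per-token block, characterised from the canonical result
def blockSpec (u : String) (w : List String) : List (String × Int) :=
  ((PySem.Set.ofList (psPure w)).filter (fun k => k.1 == u)).map
    (fun k => (k.2, ((psPure w).count k : Int)))

def stateSpec (w : List String) : List (String × Int × List (String × Int)) :=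
  (PySem.Set.ofList w).map (fun u => (u, ((w.count u : Int), blockSpec u w)))

-- ---- generic helpers ----
lemma set_ofList_map_inj {α β : Type} [BEq α] [LawfulBEq α] [BEq β] [LawfulBEq β]
    (f : α → β) (hf : Function.Injective f) (l : List α) :
    PySem.Set.ofList (l.map f) = (PySem.Set.ofList l).map f := by
  induction l with
  | nil => rfl
  | cons x l ih =>
      rw [List.map_cons, PySem.Set.ofList_cons, PySem.Set.ofList_cons]
      simp only [PySem.Set.discard, ih, List.map_cons, List.filter_map]
      congr 2
      refine List.filter_congr (fun y _ => ?_)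
      by_cases h : y = x
      · subst h; simp
      · have hne : f y ≠ f x := fun hc => h (hf hc)
        simp [Function.comp_apply, h, hne]

lemma set_ofList_filter {α : Type} [BEq α] [LawfulBEq α] (p : α → Bool) (l : List α) :
    PySem.Set.ofList (l.filter p) = (PySem.Set.ofList l).filter p := by
  induction l with
  | nil => rfl
  | cons x l ih =>
      by_cases hp : p x = true
      · rw [List.filter_cons_of_pos hp, PySem.Set.ofList_cons, PySem.Set.ofList_cons,
          List.filter_cons_of_pos hp]
        simp only [PySem.Set.discard, ih, List.filter_filter]
        congr 1
        exact List.filter_congr (fun a _ => Bool.and_comm ..)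
      · rw [List.filter_cons_of_neg hp, PySem.Set.ofList_cons, ih,
          List.filter_cons_of_neg hp]
        simp only [PySem.Set.discard, List.filter_filter]
        refine List.filter_congr (fun a _ => ?_)
        by_cases hax : a = x
        · subst hax; simp [hp]
        · simp [hax]

lemma flatMap_filter_of_nil {α β : Type} (p : α → Bool) (f : α → List β) (l : List α)
    (h : ∀ x ∈ l, p x = false → f x = []) : l.flatMap f = (l.filter p).flatMap f := by
  induction l with
  | nil => rfl
  | cons x l ih =>
      have ih' := ih (fun y hy => h y (List.mem_cons_of_mem _ hy))
      by_cases hp : p x = true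
      · rw [List.flatMap_cons, List.filter_cons_of_pos hp, List.flatMap_cons, ih']
      · rw [List.flatMap_cons, List.filter_cons_of_neg hp,
          h x (List.mem_cons_self) (by simpa using hp), List.nil_append, ih']

lemma filter_beq_of_nodup_mem {α : Type} [BEq α] [LawfulBEq α] {s : List α} {t : α}
    (hnd : s.Nodup) (ht : t ∈ s) : s.filter (· == t) = [t] := by
  have h := @List.filter_beq _ _ _ s t
  rw [List.count_eq_one_of_mem hnd ht] at h
  simpa using h

lemma filter_beq_of_not_mem {α : Type} [BEq α] [LawfulBEq α] {s : List α} {t : α}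
    (ht : t ∉ s) : s.filter (· == t) = [] := by
  have h := @List.filter_beq _ _ _ s t
  rw [List.count_eq_zero.mpr ht] at h
  simpa using h

lemma dict_ofList_items {κ ν : Type} [BEq κ] [LawfulBEq κ] (l : List (κ × ν))
    (h : (l.map (·.1)).Nodup) : (PySem.Dict.ofList l).items = l := by
  have h2 := PySem.Dict.items_foldl_insert_fresh l (fun p => p.1) (fun p => p.2)
    PySem.Dict.empty (fun a _ => rfl) h
  simpa [PySem.Dict.ofList, PySem.Dict.update] using h2

lemma dict_ofList_keys {κ ν : Type} [BEq κ] [LawfulBEq κ] (l : List (κ × ν))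
    (h : (l.map (·.1)).Nodup) : (PySem.Dict.ofList l).keys = l.map (·.1) := by
  simp only [PySem.Dict.keys, dict_ofList_items l h]

lemma dict_ofList_getD_mem (l : List (String × Int)) (h : (l.map (·.1)).Nodup)
    {u : String} {v : Int} (hm : (u, v) ∈ l) : (PySem.Dict.ofList l).getD u 0 = v := by
  refine PySem.Dict.getD_of_mem_items _ ?_ ?_ 0
  · rw [dict_ofList_items l h]; exact hm
  · rw [dict_ofList_keys l h]; exact h

lemma dict_ofList_getD_not_mem (l : List (String × Int)) (h : (l.map (·.1)).Nodup) {u : String}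
    (hm : u ∉ l.map (·.1)) : (PySem.Dict.ofList l).getD u 0 = 0 := by
  refine PySem.Dict.getD_of_not_contains _ 0 ?_
  refine Bool.eq_false_iff.mpr (fun hc => hm ?_)
  have hk := (PySem.Dict.contains_iff_mem_keys _ _).mp hc
  rwa [dict_ofList_keys l h] at hk

-- ---- facts about the pair stream ----
lemma mem_psPure {k : String × String} : ∀ {r : List String}, k ∈ psPure r →
    k.1 ∈ r ∧ k.2 ∈ r ∧ k.1 ≠ k.2
  | [], h => by simp [psPure] at h
  | t :: r, h => by
      rw [psPure, List.mem_append] at h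
      rcases h with h | h
      · simp only [List.mem_map, List.mem_filter] at h
        obtain ⟨u, ⟨hu, hne⟩, rfl⟩ := h
        refine ⟨List.mem_cons_self, List.mem_cons_of_mem _ hu, by simpa using hne⟩
      · obtain ⟨h1, h2, h3⟩ := mem_psPure h
        exact ⟨List.mem_cons_of_mem _ h1, List.mem_cons_of_mem _ h2, h3⟩

lemma mk_injective (t : String) : Function.Injective (fun u : String => (t, u)) :=
  fun a b h => by simpa using h

lemma set_psPure_cons (t : String) (r : List String) :
    PySem.Set.ofList (psPure (t :: r)) =
      ((PySem.Set.ofList (r.filter (fun u => !(t == u)))).map (fun u => (t, u))) ++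
      (PySem.Set.ofList (psPure r)).filter (fun k => !(k.1 == t)) := by
  rw [psPure, PySem.Set.ofList_append, PySem.Set.update_eq_append_filter,
    set_ofList_map_inj _ (mk_injective t)]
  congr 1
  refine List.filter_congr (fun y hy => ?_)
  have hy' : y ∈ psPure r := by
    have := hy; rwa [PySem.Set.mem_ofList] at this
  obtain ⟨h1, h2, h3⟩ := mem_psPure hy'
  congr 1
  by_cases hft : y.1 = t
  · have hmem : y ∈ (PySem.Set.ofList (r.filter (fun u => !(t == u)))).map (fun u => (t, u)) := by
      refine List.mem_map.mpr ⟨y.2, ?_, ?_⟩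
      · rw [PySem.Set.mem_ofList, List.mem_filter]
        exact ⟨h2, by simp [hft ▸ h3]⟩
      · exact Prod.ext hft.symm rfl
    rw [(PySem.Set.contains_iff _ _).mpr hmem]
    exact (beq_iff_eq.mpr hft).symm
  · have hnm : y ∉ (PySem.Set.ofList (r.filter (fun u => !(t == u)))).map (fun u => (t, u)) := by
      intro hc
      obtain ⟨u, _, hu⟩ := List.mem_map.mp hc
      exact hft (by rw [← hu])
    rw [Bool.eq_false_iff.mpr (fun hc => hnm ((PySem.Set.contains_iff _ _).mp hc))]
    exact (beq_eq_false_iff_ne.mpr hft).symm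

lemma count_psPure_cons_eq (t u : String) (r : List String) :
    (psPure (t :: r)).count (t, u) =
      (r.filter (fun v => !(t == v))).count u + (psPure r).count (t, u) := by
  rw [psPure, List.count_append]
  congr 1
  exact List.count_map_of_injective _ _ (mk_injective t) u

lemma count_psPure_cons_ne (t : String) (r : List String) (k : String × String) (h : k.1 ≠ t) :
    (psPure (t :: r)).count k = (psPure r).count k := by
  rw [psPure, List.count_append, List.count_eq_zero.mpr, Nat.zero_add]
  intro hc
  obtain ⟨v, _, hv⟩ := List.mem_map.mp hc
  exact h (congrArg Prod.fst hv).symm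

-- ---- A's side: the nested dict loop is the counter of the pair stream ----
lemma a_inner_eq (l : List String) (t : String) (d : PySem.Dict (String × String) Int) :
    l.foldl (fun d u => if t == u then d else d.modify (t, u) 0 (· + 1)) d =
      ((l.filter (fun u => !(t == u))).map (fun u => (t, u))).foldl
        (fun d k => d.modify k 0 (· + 1)) d := by
  rw [List.foldl_map, List.foldl_filter]
  refine PySem.List.foldl_congr_mem _ _ _ _ (fun acc u _ => ?_)
  by_cases h : t == u
  · simp [h]
  · simp [h]

lemma a_nested_eq : ∀ (r pre : List String) (d : PySem.Dict (String × String) Int),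
    (PySem.List.enumerate r (pre.length : Int)).foldl (fun d it =>
      (PySem.List.slice (pre ++ r) (some (it.1 + 1))).foldl (fun d token2 =>
        if it.2 == token2 then d
        else d.modify (it.2, token2) 0 (· + 1)) d) d =
    (psPure r).foldl (fun d k => d.modify k 0 (· + 1)) d := by
  intro r
  induction r with
  | nil => intro pre d; rfl
  | cons t r ih =>
      intro pre d
      rw [PySem.List.enumerate_cons, List.foldl_cons, psPure, List.foldl_append]
      have hslice : PySem.List.slice (pre ++ t :: r) (some ((pre.length : Int) + 1)) = r := by
        rw [show ((pre.length : Int) + 1) = (((pre.length + 1 : Nat) : Nat) : Int) by push_cast; ring,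
          PySem.List.slice_from _ (by positivity)]
        simp [List.drop_append]
      have hlen : ((pre.length : Int) + 1) = (((pre ++ [t]).length : Nat) : Int) := by
        simp
      have happ : pre ++ t :: r = (pre ++ [t]) ++ r := by simp
      rw [hslice, a_inner_eq, hlen, happ]
      exact ih (pre ++ [t]) _

lemma a_eq_canon (w : List String) :
    find_cooccurrences w = (canon w).map (fun p => (p.1.1, p.1.2, p.2)) := by
  have h := a_nested_eq w [] PySem.Dict.empty
  simp only [List.nil_append, List.length_nil, Nat.cast_zero] at h
  show ((PySem.List.enumerate w 0).foldl _ PySem.Dict.empty).items.map _ = _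
  rw [h]
  show (PySem.Dict.counter (psPure w)).items.map _ = _
  rw [PySem.Dict.items_counter, canon, List.map_map]

-- ---- B's side ----
lemma flatMap_congr_mem {α β : Type} {l : List α} {f g : α → List β}
    (h : ∀ x ∈ l, f x = g x) : l.flatMap f = l.flatMap g := by
  induction l with
  | nil => rfl
  | cons x l ih =>
      rw [List.flatMap_cons, List.flatMap_cons, h x List.mem_cons_self,
        ih (fun y hy => h y (List.mem_cons_of_mem _ hy))]

lemma filter_flatMap {α β : Type} (p : β → Bool) (f : α → List β) (l : List α) :
    (l.flatMap f).filter p = l.flatMap (fun x => (f x).filter p) := by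
  induction l with
  | nil => rfl
  | cons x l ih => rw [List.flatMap_cons, List.flatMap_cons, List.filter_append, ih]

lemma filt_eq (t : String) (r : List String) :
    (stateSpec r).filter (fun e => e.1 == t) =
      if t ∈ r then [(t, ((r.count t : Int), blockSpec t r))] else [] := by
  unfold stateSpec
  rw [List.filter_map]
  by_cases h : t ∈ r
  · rw [show ((fun (e : String × Int × List (String × Int)) => e.1 == t) ∘
        (fun u => (u, ((r.count u : Int), blockSpec u r)))) = (fun u => u == t) from rfl,
      filter_beq_of_nodup_mem (PySem.Set.nodup_ofList r) ((PySem.Set.mem_ofList r t).mpr h)]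
    simp [h]
  · rw [show ((fun (e : String × Int × List (String × Int)) => e.1 == t) ∘
        (fun u => (u, ((r.count u : Int), blockSpec u r)))) = (fun u => u == t) from rfl,
      filter_beq_of_not_mem (fun hc => h ((PySem.Set.mem_ofList r t).mp hc))]
    simp [h]

lemma rest_eq (t : String) (r : List String) :
    (stateSpec r).filter (fun e => !(e.1 == t)) =
      ((PySem.Set.ofList r).filter (fun u => !(u == t))).map
        (fun u => (u, ((r.count u : Int), blockSpec u r))) := by
  unfold stateSpec
  rw [List.filter_map]
  rfl

lemma blockSpec_keys_mem (t u : String) (r : List String) :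
    u ∈ (blockSpec t r).map (·.1) ↔ (t, u) ∈ psPure r := by
  unfold blockSpec
  rw [List.map_map]
  constructor
  · intro h
    obtain ⟨k, hk, hku⟩ := List.mem_map.mp h
    have hm := List.mem_filter.mp hk
    have h1 : k.1 = t := by simpa using hm.2
    have h2 : k = (t, u) := by
      cases k; cases hku; cases h1; rfl
    rw [← h2]
    exact (PySem.Set.mem_ofList _ _).mp hm.1
  · intro h
    refine List.mem_map.mpr ⟨(t, u), List.mem_filter.mpr ⟨(PySem.Set.mem_ofList _ _).mpr h, by simp⟩, rfl⟩

lemma blockSpec_keys_nodup (t : String) (r : List String) :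
    ((blockSpec t r).map (·.1)).Nodup := by
  unfold blockSpec
  rw [List.map_map]
  refine List.Nodup.map_on ?_ ((PySem.Set.nodup_ofList _).filter _)
  intro x hx y hy hxy
  have hx1 : x.1 = t := by simpa using (List.mem_filter.mp hx).2
  have hy1 : y.1 = t := by simpa using (List.mem_filter.mp hy).2
  obtain ⟨x1, x2⟩ := x
  obtain ⟨y1, y2⟩ := y
  simp only at hx1 hy1
  subst hx1; subst hy1
  have hsnd : x2 = y2 := by simpa using hxy
  rw [hsnd]

lemma blockSpec_val_mem (t u : String) (r : List String) (h : (t, u) ∈ psPure r) :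
    (u, ((psPure r).count (t, u) : Int)) ∈ blockSpec t r := by
  unfold blockSpec
  refine List.mem_map.mpr ⟨(t, u), List.mem_filter.mpr ⟨(PySem.Set.mem_ofList _ _).mpr h, by simp⟩, rfl⟩

lemma prev_getD (t : String) (r : List String) (u : String) :
    (PySem.Dict.ofList (((stateSpec r).filter (fun e => e.1 == t)).flatMap
        (fun e => e.2.2))).getD u 0 = ((psPure r).count (t, u) : Int) := by
  rw [filt_eq]
  by_cases h : t ∈ r
  · rw [if_pos h]
    simp only [List.flatMap_cons, List.flatMap_nil, List.append_nil]
    by_cases hm : (t, u) ∈ psPure r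
    · exact dict_ofList_getD_mem _ (blockSpec_keys_nodup t r) (blockSpec_val_mem t u r hm)
    · rw [dict_ofList_getD_not_mem _ (blockSpec_keys_nodup t r)
        (fun hc => hm ((blockSpec_keys_mem t u r).mp hc))]
      rw [List.count_eq_zero.mpr hm]
      rfl
  · rw [if_neg h]
    simp only [List.flatMap_nil]
    have hz : (t, u) ∉ psPure r := fun hc => h (mem_psPure hc).1
    rw [List.count_eq_zero.mpr hz]
    exact PySem.Dict.getD_empty u 0

lemma filter_S_self (t : String) (r : List String) :
    (PySem.Set.ofList (psPure (t :: r))).filter (fun k => k.1 == t) =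
      (PySem.Set.ofList (r.filter (fun v => !(t == v)))).map (fun v => (t, v)) := by
  rw [set_psPure_cons, List.filter_append]
  have h1 : ((PySem.Set.ofList (r.filter (fun v => !(t == v)))).map (fun v => (t, v))).filter
      (fun k => k.1 == t) = (PySem.Set.ofList (r.filter (fun v => !(t == v)))).map (fun v => (t, v)) := by
    rw [List.filter_map]
    rw [show ((fun (k : String × String) => k.1 == t) ∘ (fun v => (t, v))) = (fun _ => (t == t)) from rfl]
    simp
  have h2 : ((PySem.Set.ofList (psPure r)).filter (fun k => !(k.1 == t))).filter
      (fun k => k.1 == t) = [] := by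
    rw [List.filter_filter, List.filter_eq_nil_iff]
    intro a ha
    by_cases hat : a.1 = t <;> simp [hat]
  rw [h1, h2, List.append_nil]

lemma filter_S_ne (t u : String) (r : List String) (h : u ≠ t) :
    (PySem.Set.ofList (psPure (t :: r))).filter (fun k => k.1 == u) =
      (PySem.Set.ofList (psPure r)).filter (fun k => k.1 == u) := by
  rw [set_psPure_cons, List.filter_append]
  have h1 : ((PySem.Set.ofList (r.filter (fun v => !(t == v)))).map (fun v => (t, v))).filter
      (fun k => k.1 == u) = [] := by
    rw [List.filter_eq_nil_iff]
    rintro a ha hp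
    obtain ⟨v, _, rfl⟩ := List.mem_map.mp ha
    have htu : t = u := by simpa using hp
    exact h htu.symm
  rw [h1, List.nil_append, List.filter_filter]
  refine List.filter_congr (fun k _ => ?_)
  by_cases hk : k.1 = u
  · simp [hk, h]
  · simp [hk]

lemma blockSpec_cons_ne (t u : String) (r : List String) (h : u ≠ t) :
    blockSpec u (t :: r) = blockSpec u r := by
  unfold blockSpec
  rw [filter_S_ne t u r h]
  refine List.map_congr_left (fun k hk => ?_)
  have hku : k.1 = u := by simpa using (List.mem_filter.mp hk).2
  have hk1 : k.1 ≠ t := by rw [hku]; exact h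
  rw [count_psPure_cons_ne t r k hk1]

lemma discard_eq_filter (s : PySem.Set String) (t : String) :
    s.discard t = s.filter (fun u => !(u == t)) := rfl

lemma blockSpec_cons_self (t : String) (r : List String) :
    blockSpec t (t :: r) = ((PySem.Set.ofList r).discard t).map
      (fun u => (u, ((psPure (t :: r)).count (t, u) : Int))) := by
  unfold blockSpec
  rw [filter_S_self, List.map_map]
  rw [set_ofList_filter, discard_eq_filter]
  rw [List.filter_congr (fun (u : String) _ => show (!(t == u)) = (!(u == t)) by
    by_cases hu : u = t <;> simp [hu, Ne.symm])]
  rfl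

lemma bstep_spec (t : String) (r : List String) :
    bStep (stateSpec r) t = stateSpec (t :: r) := by
  have hrest : (stateSpec r).filter (fun e => !(e.1 == t)) =
      ((PySem.Set.ofList r).discard t).map
        (fun u => (u, ((r.count u : Int), blockSpec u r))) := by
    rw [rest_eq, ← discard_eq_filter]
  have htail : ((PySem.Set.ofList r).discard t).map
        (fun u => (u, ((r.count u : Int), blockSpec u r))) =
      ((PySem.Set.ofList r).discard t).map
        (fun u => (u, (((t :: r).count u : Int), blockSpec u (t :: r)))) := by
    refine List.map_congr_left (fun u hu => ?_)
    have hut : u ≠ t := by simpa using (List.mem_filter.mp hu).2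
    rw [blockSpec_cons_ne t u r hut, List.count_cons]
    simp [Ne.symm hut]
  have hct : (1 : Int) + (((stateSpec r).filter (fun e => e.1 == t)).map (fun e => e.2.1)).sum
      = (((t :: r).count t : Int)) := by
    rw [filt_eq]
    by_cases h : t ∈ r
    · rw [if_pos h]
      simp
      omega
    · rw [if_neg h]
      simp [List.count_eq_zero.mpr h]
  have hblock : ((stateSpec r).filter (fun e => !(e.1 == t))).map
        (fun e => (e.1, e.2.1 + (PySem.Dict.ofList (((stateSpec r).filter
          (fun e' => e'.1 == t)).flatMap (fun e' => e'.2.2))).getD e.1 0))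
      = blockSpec t (t :: r) := by
    rw [hrest, List.map_map, blockSpec_cons_self]
    refine List.map_congr_left (fun u hu => ?_)
    have hut : u ≠ t := by simpa using (List.mem_filter.mp hu).2
    simp only [Function.comp_apply]
    rw [prev_getD, count_psPure_cons_eq]
    rw [List.count_filter (by simpa using hut.symm)]
    refine congrArg (Prod.mk u) ?_
    push_cast
    ring
  have hstep : bStep (stateSpec r) t =
      (t, ((1 : Int) + (((stateSpec r).filter (fun e => e.1 == t)).map (fun e => e.2.1)).sum,
        ((stateSpec r).filter (fun e => !(e.1 == t))).map
          (fun e => (e.1, e.2.1 + (PySem.Dict.ofList (((stateSpec r).filter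
            (fun e' => e'.1 == t)).flatMap (fun e' => e'.2.2))).getD e.1 0)))) ::
      (stateSpec r).filter (fun e => !(e.1 == t)) := rfl
  rw [hstep, hct, hblock, hrest, htail]
  show _ = (PySem.Set.ofList (t :: r)).map _
  rw [PySem.Set.ofList_cons, List.map_cons]

lemma b_state_eq (w : List String) : w.reverse.foldl bStep [] = stateSpec w := by
  rw [List.foldl_reverse]
  induction w with
  | nil => rfl
  | cons t r ih => rw [List.foldr_cons, ih, bstep_spec]

lemma b_group (w : List String) :
    (PySem.Set.ofList w).flatMap (fun u => (PySem.Set.ofList (psPure w)).filter (fun k => k.1 == u)) =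
      PySem.Set.ofList (psPure w) := by
  induction w with
  | nil => rfl
  | cons t r ih =>
      rw [PySem.Set.ofList_cons, List.flatMap_cons, filter_S_self]
      have hnil : ∀ x ∈ PySem.Set.ofList r, (!(x == t)) = false →
          ((PySem.Set.ofList (psPure r)).filter (fun k => k.1 == x)).filter
            (fun k => !(k.1 == t)) = [] := by
        intro x _ hx
        have hxt : x = t := by simpa using hx
        subst hxt
        rw [List.filter_filter, List.filter_eq_nil_iff]
        intro a ha
        by_cases hat : a.1 = x <;> simp [hat]
      have hrest : ((PySem.Set.ofList r).discard t).flatMap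
          (fun u => (PySem.Set.ofList (psPure (t :: r))).filter (fun k => k.1 == u)) =
          (PySem.Set.ofList (psPure r)).filter (fun k => !(k.1 == t)) := by
        have e1 : (PySem.Set.ofList (psPure r)).filter (fun k => !(k.1 == t)) =
            ((PySem.Set.ofList r).discard t).flatMap
              (fun u => (PySem.Set.ofList (psPure r)).filter (fun k => k.1 == u)) := by
          conv_lhs => rw [← ih]
          rw [filter_flatMap, flatMap_filter_of_nil (fun u => !(u == t)) _ _ hnil,
            ← discard_eq_filter]
          refine flatMap_congr_mem (fun u hu => ?_)
          have hut : u ≠ t := by simpa using (List.mem_filter.mp hu).2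
          rw [List.filter_filter]
          refine List.filter_congr (fun k _ => ?_)
          by_cases hk : k.1 = u
          · simp [hk, hut]
          · simp [hk]
        rw [flatMap_congr_mem (fun u hu => filter_S_ne t u r
          (by simpa using (List.mem_filter.mp hu).2)), e1]
      rw [hrest, set_psPure_cons]

lemma b_eq_canon (w : List String) :
    find_cooccurrences_alt w = (canon w).map (fun p => (p.1.1, p.1.2, p.2)) := by
  have hform : find_cooccurrences_alt w = (PySem.Dict.ofList ((stateSpec w).flatMap
      (fun e => e.2.2.map (fun uc => ((e.1, uc.1), uc.2))))).items.map
        (fun p => (p.1.1, p.1.2, p.2)) := by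
    unfold find_cooccurrences_alt
    rw [b_state_eq]
  rw [hform]
  have hpairs : (stateSpec w).flatMap (fun e => e.2.2.map (fun uc => ((e.1, uc.1), uc.2))) =
      canon w := by
    unfold stateSpec
    rw [List.flatMap_map]
    have h1 : ∀ u ∈ PySem.Set.ofList w,
        (fun a => (fun (e : String × Int × List (String × Int)) =>
            e.2.2.map (fun uc => ((e.1, uc.1), uc.2)))
          ((fun u => (u, ((w.count u : Int), blockSpec u w))) a)) u =
        (fun u => ((PySem.Set.ofList (psPure w)).filter (fun k => k.1 == u)).map
          (fun k => (k, ((psPure w).count k : Int)))) u := by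
      intro u _
      show (blockSpec u w).map (fun uc => ((u, uc.1), uc.2)) = _
      unfold blockSpec
      rw [List.map_map]
      refine List.map_congr_left (fun k hk => ?_)
      have hk1 : k.1 = u := by simpa using (List.mem_filter.mp hk).2
      show ((u, k.2), ((psPure w).count k : Int)) = (k, ((psPure w).count k : Int))
      rw [show (u, k.2) = k from by rw [← hk1]]
    rw [flatMap_congr_mem h1, ← List.map_flatMap, b_group]
    rfl
  rw [hpairs]
  have hkeys : (canon w).map (·.1) = PySem.Set.ofList (psPure w) := by
    unfold canon
    rw [List.map_map]
    rw [show ((fun (p : (String × String) × Int) => p.1) ∘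
      (fun k => (k, ((psPure w).count k : Int)))) = id from rfl, List.map_id]
  rw [dict_ofList_items _ (by rw [hkeys]; exact PySem.Set.nodup_ofList _)]

-- ===== VERDICT (by name: the statement is the Claim_ definition above) =====
theorem find_cooccurrences_spec : Claim_equal_find_cooccurrences := by
  intro w _
  show find_cooccurrences w = find_cooccurrences_alt w
  rw [a_eq_canon, b_eq_canon]
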